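-- pv_equiv track=rewrite | github.com/Heb2100/Codingtest | 코드포스/battlingWithNumbers.py | answer
-- ===== SOURCE A (Python) =====
-- def answer(X, Y, X_primenum, Y_primenum, X_com, Y_com):
--     if X % Y != 0: return 0
--     cnt = X_primenum
--     for i in range(Y_primenum):
--         for j in range(X_primenum):
--             if Y_com[0][i] == X_com[0][j]:
--                 if Y_com[1][i] == X_com[1][j]:
--                     cnt -= 1
--     return 2 ** cnt % 998244353
-- ===== SOURCE B (Python) =====
-- def answer(X, Y, X_primenum, Y_primenum, X_com, Y_com):
--     if X % Y != 0:
--         return 0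
--     cnt = X_primenum
--     if X_primenum > 0 and Y_primenum > 0:
--         xbases = {}
--         for j in range(X_primenum):
--             xbases.setdefault(X_com[0][j], []).append(j)
--         for i in range(Y_primenum):
--             bucket = xbases.get(Y_com[0][i])
--             if bucket is not None:
--                 e = Y_com[1][i]
--                 cnt -= sum(1 for j in bucket if X_com[1][j] == e)
--     return 2 ** cnt % 998244353
-- ===== Notes on version B (the rewrite author's own statement) =====
-- stated objective: alternative
-- what changed: Replaces A's full nested scan over all (i,j) index pairs by a dict mapping each X base to its index bucket built once, so each Y factor only counts matches inside the bucket of its own base (exponent rows still read lazily, exactly as A does).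
-- outside the precondition, e.g. on answer(2, 1, 1, 2, [[2], [1]], [[2, 2], [1, 1]]): A returns 0.5, B returns 0.5; on answer(2, 1, -1, 1, [[2], [1]], [[3], [1]]): A returns 0.5, B returns 0.5
import Mathlib
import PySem

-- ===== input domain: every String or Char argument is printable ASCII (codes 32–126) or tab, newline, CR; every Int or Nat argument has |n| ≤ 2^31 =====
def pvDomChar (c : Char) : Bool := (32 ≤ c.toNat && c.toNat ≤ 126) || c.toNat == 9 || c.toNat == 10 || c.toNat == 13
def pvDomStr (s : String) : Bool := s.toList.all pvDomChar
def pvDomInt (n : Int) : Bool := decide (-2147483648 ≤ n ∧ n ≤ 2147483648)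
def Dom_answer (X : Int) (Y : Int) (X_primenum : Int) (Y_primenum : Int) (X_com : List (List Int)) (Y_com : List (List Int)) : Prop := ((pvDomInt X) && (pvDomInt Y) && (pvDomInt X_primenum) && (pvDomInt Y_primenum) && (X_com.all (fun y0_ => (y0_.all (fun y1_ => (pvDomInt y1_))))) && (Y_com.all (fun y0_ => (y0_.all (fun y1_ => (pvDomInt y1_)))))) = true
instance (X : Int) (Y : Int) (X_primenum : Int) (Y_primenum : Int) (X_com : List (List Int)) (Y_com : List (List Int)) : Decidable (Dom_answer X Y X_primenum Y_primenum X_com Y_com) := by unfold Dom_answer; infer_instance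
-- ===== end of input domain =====

-- B replaces A's nested all-pairs scan by a dict of X-base index buckets built once,
-- counting matches only inside the bucket of each Y base (objective: alternative); return value only.

-- shared indexing helpers: Python's m[k][i] with a nonnegative index; Pre_ keeps every access
-- either port performs in range, so getD with a default is exact there
def pvRow (m : List (List Int)) (k : Nat) : List Int := m.getD k []
def pvIdx (l : List Int) (i : Nat) : Int := l.getD i 0

-- ===== PORT A =====
def answer (X : Int) (Y : Int) (X_primenum : Int) (Y_primenum : Int) (X_com : List (List Int)) (Y_com : List (List Int)) : Int :=
  if PySem.Int.mod X Y ≠ 0 then 0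
  else
    let cnt := (List.range Y_primenum.toNat).foldl (fun cnt i =>
      (List.range X_primenum.toNat).foldl (fun cnt j =>
        if pvIdx (pvRow Y_com 0) i = pvIdx (pvRow X_com 0) j then
          if pvIdx (pvRow Y_com 1) i = pvIdx (pvRow X_com 1) j then cnt - 1 else cnt
        else cnt) cnt) X_primenum
    -- `2 ** cnt % 998244353`: exact for cnt ≥ 0 (Pre_ guarantees it; Python yields a float for cnt < 0)
    2 ^ cnt.toNat % 998244353

-- ===== PORT B =====
def answer_alt (X : Int) (Y : Int) (X_primenum : Int) (Y_primenum : Int) (X_com : List (List Int)) (Y_com : List (List Int)) : Int :=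
  if PySem.Int.mod X Y ≠ 0 then 0
  else
    let cnt :=
      if 0 < X_primenum ∧ 0 < Y_primenum then
        -- xbases.setdefault(X_com[0][j], []).append(j)
        let xbases : PySem.Dict Int (List Nat) :=
          (List.range X_primenum.toNat).foldl
            (fun d j => d.modify (pvIdx (pvRow X_com 0) j) [] (· ++ [j])) PySem.Dict.empty
        (List.range Y_primenum.toNat).foldl (fun cnt i =>
          match xbases.get? (pvIdx (pvRow Y_com 0) i) with
          | some bucket =>
            let e := pvIdx (pvRow Y_com 1) i
            -- cnt -= sum(1 for j in bucket if X_com[1][j] == e)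
            cnt - (bucket.countP (fun j => pvIdx (pvRow X_com 1) j == e) : Nat)
          | none => cnt) X_primenum
      else X_primenum
    -- `2 ** cnt % 998244353`: exact for cnt ≥ 0 (Pre_ guarantees it)
    2 ^ cnt.toNat % 998244353

-- ===== PRECONDITION & SPEC =====
-- number of matching (i, j) index pairs: the final exponent is X_primenum - pvMatches
def pvMatches (X_primenum : Int) (Y_primenum : Int) (X_com : List (List Int)) (Y_com : List (List Int)) : Int :=
  (((List.range Y_primenum.toNat).map (fun i =>
    (List.range X_primenum.toNat).countP (fun j =>
      pvIdx (pvRow Y_com 0) i == pvIdx (pvRow X_com 0) j &&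
      pvIdx (pvRow Y_com 1) i == pvIdx (pvRow X_com 1) j))).sum : Nat)

-- Pre_ excludes only inputs on which A returns no int: Y = 0 (ZeroDivisionError); out-of-range
-- factor-table accesses (IndexError — base rows are read for every index below the primenum
-- counts, exponent rows only at indices whose base occurs on the other side; B performs exactly
-- the same accesses); and exponents driven negative by duplicate factors, where 2**cnt % p is a
-- float (B returns the same float there).
def Pre_answer (X : Int) (Y : Int) (X_primenum : Int) (Y_primenum : Int) (X_com : List (List Int)) (Y_com : List (List Int)) : Prop :=
  Y ≠ 0 ∧ (PySem.Int.mod X Y = 0 →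
    (0 < X_primenum → 0 < Y_primenum →
      X_primenum ≤ ((pvRow X_com 0).length : Int) ∧
      Y_primenum ≤ ((pvRow Y_com 0).length : Int) ∧
      (∀ i < Y_primenum.toNat, (∃ j < X_primenum.toNat,
          pvIdx (pvRow X_com 0) j = pvIdx (pvRow Y_com 0) i) → i < (pvRow Y_com 1).length) ∧
      (∀ j < X_primenum.toNat, (∃ i < Y_primenum.toNat,
          pvIdx (pvRow X_com 0) j = pvIdx (pvRow Y_com 0) i) → j < (pvRow X_com 1).length)) ∧
    pvMatches X_primenum Y_primenum X_com Y_com ≤ X_primenum)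
instance (X : Int) (Y : Int) (X_primenum : Int) (Y_primenum : Int) (X_com : List (List Int)) (Y_com : List (List Int)) : Decidable (Pre_answer X Y X_primenum Y_primenum X_com Y_com) := by unfold Pre_answer; infer_instance

def pvWitness_answer : Int × Int × Int × Int × List (List Int) × List (List Int) :=
  (6, 3, 2, 1, [[2, 3], [1, 1]], [[3], [1]])

def Spec_answer (X : Int) (Y : Int) (X_primenum : Int) (Y_primenum : Int) (X_com : List (List Int)) (Y_com : List (List Int)) (out : Int) : Prop := out = answer_alt X Y X_primenum Y_primenum X_com Y_com
instance (X : Int) (Y : Int) (X_primenum : Int) (Y_primenum : Int) (X_com : List (List Int)) (Y_com : List (List Int)) (out : Int) : Decidable (Spec_answer X Y X_primenum Y_primenum X_com Y_com out) := by unfold Spec_answer; infer_instance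

-- ===== CLAIM (what is proved, stated in full; the proofs are below) =====
def Claim_equal_answer : Prop := ∀ (X : Int) (Y : Int) (X_primenum : Int) (Y_primenum : Int) (X_com : List (List Int)) (Y_com : List (List Int)), Dom_answer X Y X_primenum Y_primenum X_com Y_com → Pre_answer X Y X_primenum Y_primenum X_com Y_com → Spec_answer X Y X_primenum Y_primenum X_com Y_com (answer X Y X_primenum Y_primenum X_com Y_com)

-- ===== LEMMAS AND PROOFS =====

-- a fold that subtracts g x at each step subtracts the sum
lemma foldl_sub {α : Type} (l : List α) (g : α → Int) (c : Int) :
    l.foldl (fun c x => c - g x) c = c - (l.map g).sum := by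
  induction l generalizing c with
  | nil => simp
  | cons a t ih => simp [ih]; ring

-- summing g over a filtered list = summing the guarded value over the whole list
lemma sum_map_filter {α : Type} (l : List α) (p : α → Bool) (g : α → Int) :
    ((l.filter p).map g).sum = (l.map (fun x => if p x then g x else 0)).sum := by
  induction l with
  | nil => simp
  | cons a t ih => by_cases h : p a <;> simp [h, ih]

-- a count is the sum of 0/1 indicators
lemma countP_to_sum {α : Type} (l : List α) (p : α → Bool) :
    ((l.countP p : Nat) : Int) = (l.map (fun x => if p x then (1 : Int) else 0)).sum := by
  induction l with
  | nil => simp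
  | cons a t ih => by_cases h : p a <;> simp [h, ih, Int.add_comm]

theorem cnt_eq (X_primenum Y_primenum : Int) (X_com Y_com : List (List Int)) :
    (List.range Y_primenum.toNat).foldl (fun cnt i =>
      (List.range X_primenum.toNat).foldl (fun cnt j =>
        if pvIdx (pvRow Y_com 0) i = pvIdx (pvRow X_com 0) j then
          if pvIdx (pvRow Y_com 1) i = pvIdx (pvRow X_com 1) j then cnt - 1 else cnt
        else cnt) cnt) X_primenum
    = (if 0 < X_primenum ∧ 0 < Y_primenum then
        (List.range Y_primenum.toNat).foldl (fun cnt i =>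
          match ((List.range X_primenum.toNat).foldl
              (fun d j => d.modify (pvIdx (pvRow X_com 0) j) [] (· ++ [j]))
              (PySem.Dict.empty : PySem.Dict Int (List Nat))).get? (pvIdx (pvRow Y_com 0) i) with
          | some bucket =>
            cnt - (bucket.countP (fun j =>
              pvIdx (pvRow X_com 1) j == pvIdx (pvRow Y_com 1) i) : Nat)
          | none => cnt) X_primenum
      else X_primenum) := by
  by_cases hp : 0 < X_primenum ∧ 0 < Y_primenum
  · rw [if_pos hp]
    set X0 := pvIdx (pvRow X_com 0)
    set X1 := pvIdx (pvRow X_com 1)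
    set Y0 := pvIdx (pvRow Y_com 0)
    set Y1 := pvIdx (pvRow Y_com 1)
    set xbases := (List.range X_primenum.toNat).foldl
      (fun d j => d.modify (X0 j) [] (· ++ [j])) (PySem.Dict.empty : PySem.Dict Int (List Nat)) with hxb
    -- the bucket dict groups the indices of range X_primenum by base
    have hbucket : ∀ b : Int, xbases.getD b []
        = (((List.range X_primenum.toNat).map (fun j => (X0 j, j))).filter
            (fun p => p.1 == b)).map (·.2) := by
      intro b
      rw [hxb, ← List.foldl_map (f := fun j => (X0 j, j))
        (g := fun (d : PySem.Dict Int (List Nat)) p => d.modify p.1 [] (· ++ [p.2])),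
        PySem.Dict.getD_foldl_modify_append, PySem.Dict.getD_empty]
      simp
    apply PySem.List.foldl_congr_mem
    intro cnt i _
    -- collapse B's lookup: an absent key behaves like an empty bucket
    have hcol : (match xbases.get? (Y0 i) with
        | some bucket => cnt - (bucket.countP (fun j => X1 j == Y1 i) : Nat)
        | none => cnt)
        = cnt - ((xbases.getD (Y0 i) []).countP (fun j => X1 j == Y1 i) : Nat) := by
      rcases hg : xbases.get? (Y0 i) with _ | bucket <;>
        simp [PySem.Dict.getD_eq_get?_getD, hg]
    rw [hcol, hbucket]
    -- turn A's inner loop and B's bucket count into sums over range X_primenum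
    have hstepA : (fun (cnt : Int) (j : Nat) =>
        if Y0 i = X0 j then (if Y1 i = X1 j then cnt - 1 else cnt) else cnt)
        = fun cnt j => cnt - (if Y0 i = X0 j ∧ Y1 i = X1 j then (1 : Int) else 0) := by
      funext cnt j; split_ifs <;> simp_all
    rw [hstepA, foldl_sub, countP_to_sum, List.map_map, sum_map_filter]
    congr 1
    rw [List.map_map]
    refine congrArg (List.sum (α := Int)) (List.map_congr_left ?_)
    intro j _
    simp only [Function.comp_apply, beq_iff_eq]
    by_cases h0 : X0 j = Y0 i
    · by_cases h1 : X1 j = Y1 i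
      · rw [if_pos ⟨h0.symm, h1.symm⟩]; simp [h0, h1]
      · rw [if_neg (fun hc => h1 hc.2.symm)]; simp [h0, h1]
    · rw [if_neg (fun hc => h0 hc.1.symm)]; simp [h0]
  · rw [if_neg hp]
    rcases not_and_or.mp hp with hx | hy
    · have : X_primenum.toNat = 0 := by omega
      simp [this]
    · have : Y_primenum.toNat = 0 := by omega
      simp [this]

theorem answer_eq_alt (X Y X_primenum Y_primenum : Int) (X_com Y_com : List (List Int)) :
    answer X Y X_primenum Y_primenum X_com Y_com
      = answer_alt X Y X_primenum Y_primenum X_com Y_com := by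
  unfold answer answer_alt
  by_cases h : PySem.Int.mod X Y ≠ 0
  · simp [h]
  · rw [if_neg h, if_neg h]
    exact congrArg (fun c : Int => 2 ^ c.toNat % 998244353)
      (cnt_eq X_primenum Y_primenum X_com Y_com)

-- ===== VERDICT (by name: the statement is the Claim_ definition above) =====
theorem answer_spec : Claim_equal_answer := by
  intro X Y Xp Yp Xc Yc _ _
  unfold Spec_answer
  exact answer_eq_alt X Y Xp Yp Xc Yc
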